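-- pv_equiv track=rewrite | github.com/MatejKorz/AoC_2023 | day14.py | count_column
-- ===== SOURCE A (Python) =====
-- ROUND = 'O'
--
-- CUBE = '#'
--
-- def count_column(col) -> int:
--     total = 0
--     max_index = len(col)
--     round = 0
--     for i, stone in enumerate(col):
--         if stone == ROUND:
--             round += 1
--         if stone == CUBE:
--             total += sum([x for x in range(max_index, max_index - round, -1)])
--             round = 0
--             max_index = len(col) - i - 1
--     total += sum([x for x in range(max_index, max_index - round, -1)])
--
--     return total
-- ===== SOURCE B (Python) =====
-- def count_column(col) -> int:
--     total = 0
--     next_slot = len(col)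
--     for i, stone in enumerate(col):
--         if stone == 'O':
--             total += next_slot
--             next_slot -= 1
--         elif stone == '#':
--             next_slot = len(col) - i - 1
--     return total
-- ===== Notes on version B (the rewrite author's own statement) =====
-- stated objective: simpler
-- what changed: Replaced the deferred group-counter plus per-group arithmetic-series sum(range(...)) with a single pass keeping one next_slot variable and adding each round stone's load immediately.
import Mathlib
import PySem

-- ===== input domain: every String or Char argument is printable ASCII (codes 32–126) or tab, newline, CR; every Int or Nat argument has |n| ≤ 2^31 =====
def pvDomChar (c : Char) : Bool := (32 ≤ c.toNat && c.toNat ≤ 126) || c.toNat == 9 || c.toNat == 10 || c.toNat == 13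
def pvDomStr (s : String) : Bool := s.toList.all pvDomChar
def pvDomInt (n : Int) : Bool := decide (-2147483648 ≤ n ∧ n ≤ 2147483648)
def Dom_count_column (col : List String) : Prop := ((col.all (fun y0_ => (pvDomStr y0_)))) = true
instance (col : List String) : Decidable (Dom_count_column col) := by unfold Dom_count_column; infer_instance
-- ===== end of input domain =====

-- B keeps one running free slot and adds each stone's load at once instead of
-- summing an arithmetic series per group (objective: simpler).

-- ===== PORT A =====
-- loop body of A: state (total, max_index, round)
def stepA (L : Int) (s : Int × Int × Int) (p : Int × String) : Int × Int × Int :=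
  let r := if p.2 == "O" then s.2.2 + 1 else s.2.2
  if p.2 == "#" then
    (s.1 + (PySem.List.pyRange s.2.1 (s.2.1 - r) (-1)).sum, L - p.1 - 1, 0)
  else
    (s.1, s.2.1, r)

def count_column (col : List String) : Int :=
  let L : Int := PySem.List.len col
  let st := (PySem.List.enumerate col 0).foldl (stepA L) (0, L, 0)
  st.1 + (PySem.List.pyRange st.2.1 (st.2.1 - st.2.2) (-1)).sum

-- ===== PORT B =====
-- loop body of B: state (total, next_slot)
def stepB (L : Int) (s : Int × Int) (p : Int × String) : Int × Int :=
  if p.2 == "O" then (s.1 + s.2, s.2 - 1)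
  else if p.2 == "#" then (s.1, L - p.1 - 1)
  else s

def count_column_alt (col : List String) : Int :=
  let L : Int := PySem.List.len col
  ((PySem.List.enumerate col 0).foldl (stepB L) (0, L)).1

-- ===== PRECONDITION & SPEC =====
def Spec_count_column (col : List String) (out : Int) : Prop := out = count_column_alt col
instance (col : List String) (out : Int) : Decidable (Spec_count_column col out) := by unfold Spec_count_column; infer_instance

-- ===== CLAIM (what is proved, stated in full; the proofs are below) =====
def Claim_equal_count_column : Prop := ∀ (col : List String), Dom_count_column col → Spec_count_column col (count_column col)

-- ===== LEMMAS AND PROOFS =====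

-- S m r = sum(range(m, m - r, -1))
def S (m r : Int) : Int := (PySem.List.pyRange m (m - r) (-1)).sum

lemma S_zero (m : Int) : S m 0 = 0 := by
  simp [S, PySem.List.pyRange_neg_one_eq_nil]

lemma S_succ (m r : Int) (hr : 0 ≤ r) : S m (r + 1) = S m r + (m - r) := by
  have h1 : m - (m - (r + 1)) = r + 1 := by ring
  have h2 : m - (m - r) = r := by ring
  simp only [S, PySem.List.pyRange_neg_one, h1, h2]
  have ht : (r + 1).toNat = r.toNat + 1 := by omega
  rw [ht, List.range_succ]
  simp
  omega

lemma loop_eq (col : List String) (L : Int) :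
    ∀ (i t m r : Int), 0 ≤ r →
    (let a := (PySem.List.enumerate col i).foldl (stepA L) (t, m, r)
     a.1 + S a.2.1 a.2.2) =
    ((PySem.List.enumerate col i).foldl (stepB L) (t + S m r, m - r)).1 := by
  induction col with
  | nil => intro i t m r _; simp [PySem.List.enumerate_nil]
  | cons x xs ih =>
      intro i t m r hr
      rw [PySem.List.enumerate_cons]
      simp only [List.foldl_cons]
      by_cases hO : (x == "O") = true
      · have hC : (x == "#") = false := by
          cases h : x == "#" with
          | false => rfl
          | true => exact absurd (beq_iff_eq.mp h ▸ beq_iff_eq.mp hO) (by decide)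
        simp only [stepA, stepB, hO, hC, if_true, Bool.false_eq_true, if_false]
        have := ih (i + 1) t m (r + 1) (by omega)
        rw [this, S_succ m r hr]
        ring_nf
      · have hO' : (x == "O") = false := by simpa using hO
        by_cases hC : (x == "#") = true
        · simp only [stepA, stepB, hO', hC, if_true, Bool.false_eq_true, if_false]
          have := ih (i + 1) (t + S m r) (L - i - 1) 0 (by omega)
          rw [S_zero] at this
          simpa using this
        · have hC' : (x == "#") = false := by simpa using hC
          simp only [stepA, stepB, hO', hC', Bool.false_eq_true, if_false]
          exact ih (i + 1) t m r hr

-- ===== VERDICT (by name: the statement is the Claim_ definition above) =====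
theorem count_column_spec : Claim_equal_count_column := by
  intro col _
  unfold Spec_count_column count_column count_column_alt
  have h := loop_eq col (PySem.List.len col) 0 0 (PySem.List.len col) 0 le_rfl
  rw [S_zero] at h
  simpa using h
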